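-- pv_equiv track=rewrite | github.com/bilalmachraa82/iva-margem-turismo | backend/app/analytics.py | _segment_by_document_type
-- ===== SOURCE A (Python) =====
-- from typing import Dict, List, Optional, Tuple, Any
--
-- def _segment_by_document_type(calculations: List[Dict]) -> Dict[str, List[Dict]]:
--     """Segment calculations by document type"""
--     segments = {}
--     for calc in calculations:
--         doc_type = calc.get("invoice_type", "Outro")
--         if doc_type not in segments:
--             segments[doc_type] = []
--         segments[doc_type].append(calc)
--     return segments
-- ===== SOURCE B (Python) =====
-- def _segment_by_document_type(calculations):
--     """Segment calculations by document type (two-pass: key list, then dict comprehension)"""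
--     keys = list(dict.fromkeys(c.get("invoice_type", "Outro") for c in calculations))
--     return {k: [c for c in calculations if c.get("invoice_type", "Outro") == k] for k in keys}
-- ===== Notes on version B (the rewrite author's own statement) =====
-- stated objective: alternative
-- what changed: Replaces the single-pass mutate-a-dict grouping with a two-pass decomposition: first dedupe the key sequence in first-appearance order, then build the dict by a comprehension that filters the whole list per key.
import Mathlib
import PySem

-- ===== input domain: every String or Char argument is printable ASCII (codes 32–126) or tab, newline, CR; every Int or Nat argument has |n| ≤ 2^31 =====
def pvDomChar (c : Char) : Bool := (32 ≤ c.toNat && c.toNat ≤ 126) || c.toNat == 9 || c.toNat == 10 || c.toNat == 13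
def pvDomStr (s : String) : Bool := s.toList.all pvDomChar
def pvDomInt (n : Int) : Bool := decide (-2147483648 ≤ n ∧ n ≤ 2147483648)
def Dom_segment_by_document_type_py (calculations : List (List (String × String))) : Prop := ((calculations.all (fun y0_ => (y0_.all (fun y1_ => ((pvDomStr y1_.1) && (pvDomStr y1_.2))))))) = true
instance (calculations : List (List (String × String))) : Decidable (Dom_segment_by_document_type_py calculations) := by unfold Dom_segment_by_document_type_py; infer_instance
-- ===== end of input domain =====

-- B replaces A's single-pass mutate-a-dict grouping with a two-pass decomposition
-- (ordered key dedup, then a per-key filter comprehension); alternative structure, not faster.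

-- ===== PORT A =====
-- calc.get("invoice_type", "Outro")
def pvDocType (c : List (String × String)) : String :=
  (PySem.Dict.mk c).getD "invoice_type" "Outro"

def segment_by_document_type_py (calculations : List (List (String × String))) : List (String × List (List (String × String))) :=
  (calculations.foldl (fun segments c =>
      let doc_type := pvDocType c
      let segments := if segments.contains doc_type then segments else segments.insert doc_type []
      segments.modify doc_type [] (fun l => l ++ [c]))
    PySem.Dict.empty).items

-- ===== PORT B =====
def segment_by_document_type_py_alt (calculations : List (List (String × String))) : List (String × List (List (String × String))) :=
  let keys := PySem.List.dedup (calculations.map pvDocType)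
  keys.map (fun k => (k, calculations.filter (fun c => pvDocType c == k)))

-- ===== PRECONDITION & SPEC =====
def Spec_segment_by_document_type_py (calculations : List (List (String × String))) (out : List (String × List (List (String × String)))) : Prop := out = segment_by_document_type_py_alt calculations
instance (calculations : List (List (String × String))) (out : List (String × List (List (String × String)))) : Decidable (Spec_segment_by_document_type_py calculations out) := by unfold Spec_segment_by_document_type_py; infer_instance

-- ===== CLAIM (what is proved, stated in full; the proofs are below) =====
def Claim_equal_segment_by_document_type_py : Prop := ∀ (calculations : List (List (String × String))), Dom_segment_by_document_type_py calculations → Spec_segment_by_document_type_py calculations (segment_by_document_type_py calculations)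

-- ===== LEMMAS AND PROOFS =====


-- A's loop body ("if absent: insert []; then append") is exactly a modify with default [].
lemma step_eq_modify (d : PySem.Dict String (List (List (String × String)))) (k : String)
    (c : List (String × String)) :
    (if d.contains k then d else d.insert k []).modify k [] (fun l => l ++ [c])
      = d.modify k [] (fun l => l ++ [c]) := by
  by_cases h : d.contains k = true
  · simp [h]
  · rw [Bool.not_eq_true] at h
    rw [if_neg (by simp [h])]
    apply PySem.Dict.ext
    have hk : ∀ p ∈ d.items, p.1 ≠ k := by
      intro p hp hpk
      have hm := PySem.Dict.mem_keys_of_mem_items (d := d) hp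
      rw [hpk] at hm
      have : d.contains k = true := by
        rw [PySem.Dict.contains_iff_mem_keys]; exact hm
      simp [h] at this
    simp only [PySem.Dict.modify, PySem.Dict.getD_insert_self,
      PySem.Dict.getD_of_not_contains, h, PySem.Dict.items_insert,
      PySem.Dict.contains_insert_self, if_true, Bool.false_eq_true, if_false,
      List.map_append, List.nil_append]
    congr 1
    have hid : ∀ p ∈ d.items,
        (fun p : String × List (List (String × String)) =>
          if (p.1 == k) = true then (k, [c]) else p) p = id p := by
      intro p hp
      simp [hk p hp]
    rw [List.map_congr_left hid, List.map_id]
    simp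

-- items of a Nodup-keyed dict are recovered key-by-key via getD
lemma items_eq_map_keys (d : PySem.Dict String (List (List (String × String))))
    (h : d.keys.Nodup) :
    d.items = d.keys.map (fun k => (k, d.getD k [])) := by
  have hthis : ∀ p ∈ d.items, (fun q : String × List (List (String × String)) => (q.1, d.getD q.1 [])) p = id p := by
    intro p hp
    have := PySem.Dict.getD_of_mem_items (d := d) (k := p.1) (v := p.2) (d0 := []) (by simpa using hp) h
    simp [this]
  calc d.items = d.items.map (fun q => (q.1, d.getD q.1 [])) :=
        ((List.map_congr_left hthis).trans (List.map_id _)).symm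
    _ = d.keys.map (fun k => (k, d.getD k [])) := by
        simp [PySem.Dict.keys, List.map_map, Function.comp]

-- ===== VERDICT (by name: the statement is the Claim_ definition above) =====
theorem segment_by_document_type_py_spec : Claim_equal_segment_by_document_type_py := by
  intro calculations _
  unfold Spec_segment_by_document_type_py segment_by_document_type_py segment_by_document_type_py_alt
  have hstep : calculations.foldl (fun segments c =>
        let doc_type := pvDocType c
        let segments := if segments.contains doc_type then segments else segments.insert doc_type []
        segments.modify doc_type [] (fun l => l ++ [c])) PySem.Dict.empty
      = calculations.foldl (fun d c => d.modify (pvDocType c) [] (fun l => l ++ [c])) PySem.Dict.empty := by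
    apply PySem.List.foldl_congr_mem
    intro acc x _
    exact step_eq_modify acc (pvDocType x) x
  rw [hstep]
  set F := calculations.foldl (fun d c => d.modify (pvDocType c) [] (fun l => l ++ [c])) PySem.Dict.empty with hF
  have hpair : F = (calculations.map (fun c => (pvDocType c, c))).foldl
      (fun d p => d.modify p.1 [] (fun l => l ++ [p.2])) PySem.Dict.empty := by
    rw [List.foldl_map]
  have hkeys : F.keys = PySem.List.dedup (calculations.map pvDocType) := by
    rw [hF, PySem.Dict.keys_foldl_modify_key]
    simp [PySem.List.dedup_eq_ofList, PySem.Set.update, PySem.Set.ofList_eq_foldl]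
  have hnodup : F.keys.Nodup := by
    rw [hF]
    exact PySem.Dict.nodup_keys_foldl_modify_key _ _ _ _ _ (by simp [PySem.Dict.keys_empty])
  have hgetD : ∀ k, F.getD k [] = calculations.filter (fun c => pvDocType c == k) := by
    intro k
    rw [hpair, PySem.Dict.getD_foldl_modify_append, List.filter_map]
    simp [Function.comp_def]
  rw [items_eq_map_keys F hnodup, hkeys]
  apply List.map_congr_left
  intro k _
  rw [hgetD]
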